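-- pv_equiv track=rewrite | github.com/lifewnaoption/MAI_Python_UIRS | wristband patterns.py | is_wristband
-- ===== SOURCE A (Python) =====
-- def is_wristband(arr):
--     note = {1, 2, 3, 4}
--     for i, j in zip(arr, arr[1:]):
--         if 1 in note and (len(set(i)) != 1 or len(set(j)) != 1):
--             note.remove(1)
--         if 2 in note and i != j:
--             note.remove(2)
--         if 3 in note and i[:-1] != j[1:]:
--             note.remove(3)
--         if 4 in note and j[:-1] != i[1:]:
--             note.remove(4)
--         if not note:
--             return False
--     return True
-- ===== SOURCE B (Python) =====
-- def is_wristband(arr):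
--     pairs = list(zip(arr, arr[1:]))
--     p1 = all(len(set(i)) == 1 and len(set(j)) == 1 for i, j in pairs)
--     p2 = all(i == j for i, j in pairs)
--     p3 = all(i[:-1] == j[1:] for i, j in pairs)
--     p4 = all(j[:-1] == i[1:] for i, j in pairs)
--     return p1 or p2 or p3 or p4
-- ===== Notes on version B (the rewrite author's own statement) =====
-- stated objective: simpler
-- what changed: Replaces the mutable candidate set with early-exit removal by four independent all() predicate passes over the adjacent-row pairs, one per pattern, combined with or.
import Mathlib
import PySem

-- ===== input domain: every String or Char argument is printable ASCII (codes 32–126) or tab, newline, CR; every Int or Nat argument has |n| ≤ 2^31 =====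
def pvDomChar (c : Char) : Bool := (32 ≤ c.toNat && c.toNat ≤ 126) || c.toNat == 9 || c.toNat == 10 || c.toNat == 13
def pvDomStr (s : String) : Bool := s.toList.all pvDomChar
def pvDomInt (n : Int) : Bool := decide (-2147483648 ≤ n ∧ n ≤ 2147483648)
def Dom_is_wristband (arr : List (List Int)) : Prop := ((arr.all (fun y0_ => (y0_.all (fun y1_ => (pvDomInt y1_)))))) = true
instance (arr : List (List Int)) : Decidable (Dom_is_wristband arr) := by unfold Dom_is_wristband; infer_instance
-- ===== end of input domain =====

-- B replaces A's mutable candidate set with early exit by four independent all() passes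
-- over the adjacent-row pairs, one per pattern, combined with 'or' (objective: simpler).

-- ===== PORT A =====
-- loop over zip(arr, arr[1:]) carrying the mutable set 'note'
def is_wristband_loop (pairs : List (List Int × List Int)) (note : PySem.Set Int) : Bool :=
  match pairs with
  | [] => true
  | (i, j) :: rest =>
    let n1 := if PySem.Set.contains note 1 &&
        (PySem.Set.len (PySem.Set.ofList i) != 1 || PySem.Set.len (PySem.Set.ofList j) != 1)
      then PySem.Set.discard note 1 else note
    let n2 := if PySem.Set.contains n1 2 && (i != j) then PySem.Set.discard n1 2 else n1
    let n3 := if PySem.Set.contains n2 3 &&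
        (PySem.List.slice i none (some (-1)) != PySem.List.slice j (some 1) none)
      then PySem.Set.discard n2 3 else n2
    let n4 := if PySem.Set.contains n3 4 &&
        (PySem.List.slice j none (some (-1)) != PySem.List.slice i (some 1) none)
      then PySem.Set.discard n3 4 else n3
    if n4 = [] then false else is_wristband_loop rest n4

def is_wristband (arr : List (List Int)) : Bool :=
  is_wristband_loop (arr.zip (PySem.List.slice arr (some 1) none)) (PySem.Set.ofList [1, 2, 3, 4])

-- ===== PORT B =====
def is_wristband_alt (arr : List (List Int)) : Bool :=
  let pairs := arr.zip (PySem.List.slice arr (some 1) none)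
  let p1 := pairs.all (fun p =>
    PySem.Set.len (PySem.Set.ofList p.1) == 1 && PySem.Set.len (PySem.Set.ofList p.2) == 1)
  let p2 := pairs.all (fun p => p.1 == p.2)
  let p3 := pairs.all (fun p =>
    PySem.List.slice p.1 none (some (-1)) == PySem.List.slice p.2 (some 1) none)
  let p4 := pairs.all (fun p =>
    PySem.List.slice p.2 none (some (-1)) == PySem.List.slice p.1 (some 1) none)
  p1 || p2 || p3 || p4

-- ===== PRECONDITION & SPEC =====
def Spec_is_wristband (arr : List (List Int)) (out : Bool) : Prop := out = is_wristband_alt arr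
instance (arr : List (List Int)) (out : Bool) : Decidable (Spec_is_wristband arr out) := by unfold Spec_is_wristband; infer_instance

-- ===== CLAIM (what is proved, stated in full; the proofs are below) =====
def Claim_equal_is_wristband : Prop := ∀ (arr : List (List Int)), Dom_is_wristband arr → Spec_is_wristband arr (is_wristband arr)

-- ===== LEMMAS AND PROOFS =====

-- the four per-pair "pattern still holds" conditions (B's predicates)
def pvC1 (p : List Int × List Int) : Bool :=
  PySem.Set.len (PySem.Set.ofList p.1) == 1 && PySem.Set.len (PySem.Set.ofList p.2) == 1
def pvC2 (p : List Int × List Int) : Bool := p.1 == p.2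
def pvC3 (p : List Int × List Int) : Bool :=
  PySem.List.slice p.1 none (some (-1)) == PySem.List.slice p.2 (some 1) none
def pvC4 (p : List Int × List Int) : Bool :=
  PySem.List.slice p.2 none (some (-1)) == PySem.List.slice p.1 (some 1) none

-- how one conditional removal changes membership
lemma pv_contains_step (note : PySem.Set Int) (k m : Int) (b : Bool) :
    PySem.Set.contains (if PySem.Set.contains note k && !b then PySem.Set.discard note k else note) m
      = if m = k then PySem.Set.contains note k && b else PySem.Set.contains note m := by
  by_cases hc : PySem.Set.contains note k <;> by_cases hb : b <;> by_cases hm : m = k <;>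
    simp_all [PySem.Set.contains, PySem.Set.discard, List.contains_eq_mem, List.mem_filter]

lemma pv_mem_step (note : PySem.Set Int) (k : Int) (c : Bool) (x : Int)
    (h : x ∈ (if c then PySem.Set.discard note k else note)) : x ∈ note := by
  split at h
  · exact ((PySem.Set.mem_discard _ _ _).mp h).1
  · exact h

-- the loop returns true iff some still-present candidate's condition holds on all pairs
lemma pv_loop_eq (pairs : List (List Int × List Int)) (note : PySem.Set Int)
    (hne : note ≠ [])
    (hsub : ∀ x ∈ note, x = 1 ∨ x = 2 ∨ x = 3 ∨ x = 4) :
    is_wristband_loop pairs note =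
      (PySem.Set.contains note 1 && pairs.all pvC1 ||
       PySem.Set.contains note 2 && pairs.all pvC2 ||
       PySem.Set.contains note 3 && pairs.all pvC3 ||
       PySem.Set.contains note 4 && pairs.all pvC4) := by
  induction pairs generalizing note with
  | nil =>
    simp only [is_wristband_loop, List.all_nil, Bool.and_true]
    rcases List.exists_mem_of_ne_nil note hne with ⟨x, hx⟩
    rcases hsub x hx with rfl | rfl | rfl | rfl <;>
      simp [PySem.Set.contains_eq_listContains, List.contains_eq_mem] <;> tauto
  | cons p rest ih =>
    obtain ⟨i, j⟩ := p
    simp only [is_wristband_loop]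
    set c1 : Bool := pvC1 (i, j) with hc1
    set c2 : Bool := pvC2 (i, j) with hc2
    set c3 : Bool := pvC3 (i, j) with hc3
    set c4 : Bool := pvC4 (i, j) with hc4
    have e1 : (PySem.Set.len (PySem.Set.ofList i) != 1 || PySem.Set.len (PySem.Set.ofList j) != 1) = !c1 := by
      simp [hc1, pvC1, bne]
    have e2 : (i != j) = !c2 := by simp [hc2, pvC2, bne]
    have e3 : (PySem.List.slice i none (some (-1)) != PySem.List.slice j (some 1) none) = !c3 := by
      simp [hc3, pvC3, bne]
    have e4 : (PySem.List.slice j none (some (-1)) != PySem.List.slice i (some 1) none) = !c4 := by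
      simp [hc4, pvC4, bne]
    rw [e1]
    set n1 := if PySem.Set.contains note 1 && !c1 then PySem.Set.discard note 1 else note with hn1
    rw [e2]
    set n2 := if PySem.Set.contains n1 2 && !c2 then PySem.Set.discard n1 2 else n1 with hn2
    rw [e3]
    set n3 := if PySem.Set.contains n2 3 && !c3 then PySem.Set.discard n2 3 else n2 with hn3
    rw [e4]
    set n4 := if PySem.Set.contains n3 4 && !c4 then PySem.Set.discard n3 4 else n3 with hn4
    have hm1 : ∀ m, PySem.Set.contains n1 m = if m = 1 then PySem.Set.contains note 1 && c1 else PySem.Set.contains note m := fun m => by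
      rw [hn1]; exact pv_contains_step note 1 m c1
    have hm2 : ∀ m, PySem.Set.contains n2 m = if m = 2 then PySem.Set.contains n1 2 && c2 else PySem.Set.contains n1 m := fun m => by
      rw [hn2]; exact pv_contains_step n1 2 m c2
    have hm3 : ∀ m, PySem.Set.contains n3 m = if m = 3 then PySem.Set.contains n2 3 && c3 else PySem.Set.contains n2 m := fun m => by
      rw [hn3]; exact pv_contains_step n2 3 m c3
    have hm4 : ∀ m, PySem.Set.contains n4 m = if m = 4 then PySem.Set.contains n3 4 && c4 else PySem.Set.contains n3 m := fun m => by
      rw [hn4]; exact pv_contains_step n3 4 m c4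
    have g1 : PySem.Set.contains n4 1 = (PySem.Set.contains note 1 && c1) := by
      rw [hm4 1, hm3 1, hm2 1, hm1 1]; norm_num
    have g2 : PySem.Set.contains n4 2 = (PySem.Set.contains note 2 && c2) := by
      rw [hm4 2, hm3 2, hm2 2]; simp only [hm1 2]; norm_num
    have g3 : PySem.Set.contains n4 3 = (PySem.Set.contains note 3 && c3) := by
      rw [hm4 3]; simp only [hm3 3, hm2 3, hm1 3]; norm_num
    have g4 : PySem.Set.contains n4 4 = (PySem.Set.contains note 4 && c4) := by
      simp only [hm4 4, hm3 4, hm2 4, hm1 4]; norm_num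
    have hsub4 : ∀ x ∈ n4, x = 1 ∨ x = 2 ∨ x = 3 ∨ x = 4 := by
      intro x hx
      rw [hn4] at hx
      have hx3 := pv_mem_step _ _ _ _ hx
      rw [hn3] at hx3
      have hx2 := pv_mem_step _ _ _ _ hx3
      rw [hn2] at hx2
      have hx1 := pv_mem_step _ _ _ _ hx2
      rw [hn1] at hx1
      exact hsub x (pv_mem_step _ _ _ _ hx1)
    by_cases hnil : n4 = []
    · rw [if_pos hnil]
      have z1 : (PySem.Set.contains note 1 && c1) = false := by
        rw [← g1]; simp [PySem.Set.contains_eq_listContains, hnil]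
      have z2 : (PySem.Set.contains note 2 && c2) = false := by
        rw [← g2]; simp [PySem.Set.contains_eq_listContains, hnil]
      have z3 : (PySem.Set.contains note 3 && c3) = false := by
        rw [← g3]; simp [PySem.Set.contains_eq_listContains, hnil]
      have z4 : (PySem.Set.contains note 4 && c4) = false := by
        rw [← g4]; simp [PySem.Set.contains_eq_listContains, hnil]
      simp only [List.all_cons, ← hc1, ← hc2, ← hc3, ← hc4, ← Bool.and_assoc,
        z1, z2, z3, z4, Bool.false_and, Bool.or_self]
    · rw [if_neg hnil, ih n4 hnil hsub4, g1, g2, g3, g4]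
      simp only [List.all_cons, ← hc1, ← hc2, ← hc3, ← hc4, Bool.and_assoc]

-- ===== VERDICT (by name: the statement is the Claim_ definition above) =====
theorem is_wristband_spec : Claim_equal_is_wristband := by
  intro arr _
  unfold Spec_is_wristband is_wristband
  rw [pv_loop_eq _ _ (by decide) (by decide)]
  have c1t : PySem.Set.contains (PySem.Set.ofList ([1, 2, 3, 4] : List Int)) 1 = true := by decide
  have c2t : PySem.Set.contains (PySem.Set.ofList ([1, 2, 3, 4] : List Int)) 2 = true := by decide
  have c3t : PySem.Set.contains (PySem.Set.ofList ([1, 2, 3, 4] : List Int)) 3 = true := by decide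
  have c4t : PySem.Set.contains (PySem.Set.ofList ([1, 2, 3, 4] : List Int)) 4 = true := by decide
  simp only [c1t, c2t, c3t, c4t, Bool.true_and]
  have u1 : pvC1 = (fun p : List Int × List Int =>
    PySem.Set.len (PySem.Set.ofList p.1) == 1 && PySem.Set.len (PySem.Set.ofList p.2) == 1) := rfl
  have u2 : pvC2 = (fun p : List Int × List Int => p.1 == p.2) := rfl
  have u3 : pvC3 = (fun p : List Int × List Int =>
    PySem.List.slice p.1 none (some (-1)) == PySem.List.slice p.2 (some 1) none) := rfl
  have u4 : pvC4 = (fun p : List Int × List Int =>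
    PySem.List.slice p.2 none (some (-1)) == PySem.List.slice p.1 (some 1) none) := rfl
  rw [u1, u2, u3, u4]
  rfl
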